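-- pv_equiv track=rewrite | github.com/ayoubzulfiqar/Leeteration | BiggestSingleNumber/biggest_single_number.py | biggest_single_number
-- ===== SOURCE A (Python) =====
-- import collections
--
-- def biggest_single_number(my_numbers_table):
--     counts = collections.Counter(my_numbers_table)
--     single_numbers = []
--     for num, count in counts.items():
--         if count == 1:
--             single_numbers.append(num)
--     if single_numbers:
--         return {"num": max(single_numbers)}
--     else:
--         return {"num": None}
-- ===== SOURCE B (Python) =====
-- def biggest_single_number(my_numbers_table):
--     # Sort a copy ascending, then one adjacent-grouping pass tracking the
--     # last (= largest) value whose run has length exactly 1.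
--     s = sorted(my_numbers_table)
--     best = None
--     i = 0
--     n = len(s)
--     while i < n:
--         j = i + 1
--         while j < n and s[j] == s[i]:
--             j += 1
--         if j == i + 1:
--             best = s[i]
--         i = j
--     return {"num": best}
-- ===== Notes on version B (the rewrite author's own statement) =====
-- stated objective: alternative
-- what changed: Replaces the Counter-then-filter-then-max pipeline by sorting a copy and doing one adjacent-grouping scan that keeps the running maximum of run-length-1 values.
import Mathlib
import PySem

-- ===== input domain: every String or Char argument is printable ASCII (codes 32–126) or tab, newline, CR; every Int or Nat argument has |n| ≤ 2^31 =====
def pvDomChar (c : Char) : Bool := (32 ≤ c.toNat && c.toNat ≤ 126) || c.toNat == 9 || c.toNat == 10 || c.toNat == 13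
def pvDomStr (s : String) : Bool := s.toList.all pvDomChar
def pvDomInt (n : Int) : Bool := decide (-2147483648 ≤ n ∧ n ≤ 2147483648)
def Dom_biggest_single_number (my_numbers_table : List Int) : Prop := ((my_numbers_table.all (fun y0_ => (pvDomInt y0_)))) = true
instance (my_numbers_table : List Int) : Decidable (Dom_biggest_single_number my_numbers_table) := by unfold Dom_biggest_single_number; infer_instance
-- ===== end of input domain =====

-- B replaces Counter+filter+max by sort-then-one-grouping-scan (alternative decomposition, same result).

-- ===== PORT A =====
def biggest_single_number (my_numbers_table : List Int) : List (String × Option Int) :=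
  let counts := PySem.Dict.counter my_numbers_table
  let single_numbers := counts.items.foldl
    (fun acc (p : Int × Int) => if p.2 == 1 then acc ++ [p.1] else acc) ([] : List Int)
  if !single_numbers.isEmpty then
    [("num", PySem.List.max? single_numbers (fun y => y))]
  else
    [("num", none)]

-- ===== PORT B =====
-- the outer while loop of Source B: each step consumes one run of equal values
-- (the inner `while s[j] == s[i]` advance is the takeWhile/dropWhile split)
def bsnScan : List Int → Option Int → Option Int
  | [], best => best
  | x :: t, best =>
      bsnScan (t.dropWhile (fun y => y == x))
              (if (t.takeWhile (fun y => y == x)).isEmpty then some x else best)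
termination_by s _ => s.length
decreasing_by simpa using Nat.lt_succ_of_le (List.length_dropWhile_le _ _)

def biggest_single_number_alt (my_numbers_table : List Int) : List (String × Option Int) :=
  [("num", bsnScan (PySem.List.sorted my_numbers_table (fun y => y) false) none)]

-- ===== PRECONDITION & SPEC =====
def Spec_biggest_single_number (my_numbers_table : List Int) (out : List (String × Option Int)) : Prop := out = biggest_single_number_alt my_numbers_table
instance (my_numbers_table : List Int) (out : List (String × Option Int)) : Decidable (Spec_biggest_single_number my_numbers_table out) := by unfold Spec_biggest_single_number; infer_instance

-- ===== CLAIM (what is proved, stated in full; the proofs are below) =====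
def Claim_equal_biggest_single_number : Prop := ∀ (my_numbers_table : List Int), Dom_biggest_single_number my_numbers_table → Spec_biggest_single_number my_numbers_table (biggest_single_number my_numbers_table)

-- ===== LEMMAS AND PROOFS =====

-- "o is the answer for xs": none iff xs has no element of count 1,
-- some m iff m is the largest element of count 1.
def GoodAns (xs : List Int) : Option Int → Prop
  | none => ∀ y ∈ xs, xs.count y ≠ 1
  | some m => xs.count m = 1 ∧ ∀ y ∈ xs, xs.count y = 1 → y ≤ m

lemma goodAns_unique {xs : List Int} {o₁ o₂ : Option Int}
    (h₁ : GoodAns xs o₁) (h₂ : GoodAns xs o₂) : o₁ = o₂ := by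
  cases o₁ with
  | none => cases o₂ with
    | none => rfl
    | some m => exact absurd h₂.1 (h₁ m (List.count_pos_iff.mp (h₂.1 ▸ Nat.one_pos)))
  | some m => cases o₂ with
    | none => exact absurd h₁.1 (h₂ m (List.count_pos_iff.mp (h₁.1 ▸ Nat.one_pos)))
    | some m' =>
        have hm : m ∈ xs := List.count_pos_iff.mp (h₁.1 ▸ Nat.one_pos)
        have hm' : m' ∈ xs := List.count_pos_iff.mp (h₂.1 ▸ Nat.one_pos)
        exact congrArg some (le_antisymm (h₂.2 m hm h₁.1) (h₁.2 m' hm' h₂.1))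

def singlesOf (xs : List Int) : List Int :=
  (PySem.Set.ofList xs).filter (fun k => ((xs.count k : Int)) == 1)

-- A's pipeline produces exactly max? of the count-1 elements (in first-occurrence order)
lemma a_eq (xs : List Int) :
    biggest_single_number xs = [("num", PySem.List.max? (singlesOf xs) (fun y => y))] := by
  have hs : ((List.map (fun k => (k, ((List.count k xs : Int)))) (PySem.Set.ofList xs)).filter
      (fun p => p.2 == 1)).map Prod.fst = singlesOf xs := by
    rw [List.filter_map, List.map_map]
    simp [singlesOf, Function.comp_def]
  simp only [biggest_single_number, PySem.Dict.items_counter, PySem.List.foldl_append_if,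
    List.nil_append, hs]
  by_cases h : singlesOf xs = []
  · simp [h, PySem.List.max?]
  · simp [h]

lemma good_singles (xs : List Int) :
    GoodAns xs (PySem.List.max? (singlesOf xs) (fun y => y)) := by
  cases hmax : PySem.List.max? (singlesOf xs) (fun y => y) with
  | none =>
      have hnil : singlesOf xs = [] := (PySem.List.max?_eq_none_iff _ _).mp hmax
      intro y hy hc
      have : y ∈ singlesOf xs := by
        simp [singlesOf, List.mem_filter, PySem.Set.mem_ofList, hy, hc]
      simp [hnil] at this
  | some m =>
      have hmem := PySem.List.max?_mem hmax
      rw [singlesOf, List.mem_filter] at hmem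
      refine ⟨by simpa using hmem.2, ?_⟩
      intro y hy hc
      have hyS : y ∈ singlesOf xs := by
        simp [singlesOf, List.mem_filter, PySem.Set.mem_ofList, hy, hc]
      exact PySem.List.max?_isMax hmax y hyS

-- the grouping scan of B computes the answer on any sorted list
lemma scan_spec (n : Nat) : ∀ (s : List Int), s.length ≤ n → s.Pairwise (· ≤ ·) →
    ∀ b : Option Int,
    ((∀ y ∈ s, s.count y ≠ 1) ∧ bsnScan s b = b) ∨
    (∃ m, bsnScan s b = some m ∧ s.count m = 1 ∧ ∀ y ∈ s, s.count y = 1 → y ≤ m) := by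
  induction n with
  | zero =>
      intro s hlen _ b
      have : s = [] := List.length_eq_zero_iff.mp (Nat.le_zero.mp hlen)
      subst this
      exact Or.inl ⟨by simp, by rw [bsnScan]⟩
  | succ n IH =>
      intro s hlen hpw b
      match s with
      | [] => exact Or.inl ⟨by simp, by rw [bsnScan]⟩
      | x :: t =>
        have hxle : ∀ y ∈ t, x ≤ y := (List.pairwise_cons.mp hpw).1
        have hpwt : t.Pairwise (· ≤ ·) := (List.pairwise_cons.mp hpw).2
        have htrs : t.takeWhile (fun y => y == x) ++ t.dropWhile (fun y => y == x) = t :=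
          List.takeWhile_append_dropWhile
        have hrun : ∀ y ∈ t.takeWhile (fun y => y == x), y = x := by
          intro y hy; simpa using List.mem_takeWhile_imp hy
        have hpwrest : (t.dropWhile (fun y => y == x)).Pairwise (· ≤ ·) :=
          List.Pairwise.sublist (List.dropWhile_sublist _) hpwt
        have hrest_gt : ∀ y ∈ t.dropWhile (fun y => y == x), x < y := by
          cases hr : t.dropWhile (fun y => y == x) with
          | nil => intro y hy; simp at hy
          | cons h r =>
              have hh : (h == x) = false := by
                have := List.head?_dropWhile_not (fun y => y == x) t
                simp [hr] at this
                simpa using this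
              have hhx : h ≠ x := by simpa using hh
              have hht : h ∈ t := (List.dropWhile_sublist _).subset (by rw [hr]; exact List.mem_cons_self)
              have hxh : x < h := lt_of_le_of_ne (hxle h hht) (Ne.symm hhx)
              intro y hy
              have hpwr2 := hpwrest
              rw [hr] at hpwr2
              rcases List.mem_cons.mp hy with rfl | hyr
              · exact hxh
              · exact lt_of_lt_of_le hxh ((List.pairwise_cons.mp hpwr2).1 y hyr)
        have hcrun : List.count x (t.takeWhile (fun y => y == x)) =
            (t.takeWhile (fun y => y == x)).length :=
          List.count_eq_length.mpr (fun b hb => (hrun b hb).symm)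
        have hcrest0 : List.count x (t.dropWhile (fun y => y == x)) = 0 :=
          List.count_eq_zero.mpr (fun hx => lt_irrefl x (hrest_gt x hx))
        have hct : List.count x t = (t.takeWhile (fun y => y == x)).length := by
          conv_lhs => rw [← htrs]
          rw [List.count_append, hcrun, hcrest0]
          omega
        have hcx : List.count x (x :: t) = (t.takeWhile (fun y => y == x)).length + 1 := by
          rw [List.count_cons_self, hct]
        have hcy : ∀ y, x < y →
            List.count y (x :: t) = List.count y (t.dropWhile (fun y => y == x)) := by
          intro y hxy
          have h0 : List.count y (t.takeWhile (fun y => y == x)) = 0 :=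
            List.count_eq_zero.mpr (fun hy => absurd (hrun y hy) (ne_of_gt hxy))
          rw [List.count_cons_of_ne (ne_of_lt hxy)]
          conv_lhs => rw [← htrs]
          rw [List.count_append, h0, Nat.zero_add]
        have hrlen : (t.dropWhile (fun y => y == x)).length ≤ n := by
          have := List.length_dropWhile_le (fun y => y == x) t
          simp at hlen; omega
        have hstep : bsnScan (x :: t) b =
            bsnScan (t.dropWhile (fun y => y == x))
              (if (t.takeWhile (fun y => y == x)).isEmpty then some x else b) := by
          rw [bsnScan]
        -- split a member of x :: t into the three zones
        have hsplit : ∀ y, y ∈ x :: t → y = x ∨ y ∈ t.dropWhile (fun y => y == x) := by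
          intro y hy
          rcases List.mem_cons.mp hy with rfl | hyt
          · exact Or.inl rfl
          · rcases List.mem_append.mp (htrs ▸ hyt) with hy1 | hy2
            · exact Or.inl (hrun y hy1)
            · exact Or.inr hy2
        rcases IH (t.dropWhile (fun y => y == x)) hrlen hpwrest
            (if (t.takeWhile (fun y => y == x)).isEmpty then some x else b) with
          ⟨hno, heq⟩ | ⟨m, heq, hm1, hmax⟩
        · by_cases hre : (t.takeWhile (fun y => y == x)).isEmpty
          · -- the run of x has length 1: x is a singleton, and the largest so far
            refine Or.inr ⟨x, ?_, ?_, ?_⟩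
            · rw [hstep, hre]; simpa [hre] using heq
            · have : (t.takeWhile (fun y => y == x)).length = 0 := by
                simpa [List.isEmpty_iff, List.length_eq_zero_iff] using hre
              omega
            · intro y hy hc
              rcases hsplit y hy with hyx | hyr
              · exact hyx.le
              · exact absurd (by rw [← hcy y (hrest_gt y hyr)]; exact hc) (hno y hyr)
          · -- the run of x has length ≥ 2: no singleton in x :: t at all
            refine Or.inl ⟨?_, ?_⟩
            · intro y hy
              rcases hsplit y hy with hyx | hyr
              · have : (t.takeWhile (fun y => y == x)).length ≠ 0 := by
                  simpa [List.isEmpty_iff, List.length_eq_zero_iff] using hre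
                rw [hyx, hcx]; omega
              · rw [hcy y (hrest_gt y hyr)]; exact hno y hyr
            · rw [hstep]; simpa [hre] using heq
        · -- the tail has a max singleton m; it dominates x as well
          have hmmem : m ∈ t.dropWhile (fun y => y == x) :=
            List.count_pos_iff.mp (hm1 ▸ Nat.one_pos)
          have hxm : x < m := hrest_gt m hmmem
          refine Or.inr ⟨m, by rw [hstep]; exact heq, by rw [hcy m hxm]; exact hm1, ?_⟩
          intro y hy hc
          rcases hsplit y hy with hyx | hyr
          · exact hyx.le.trans hxm.le
          · exact hmax y hyr (by rw [← hcy y (hrest_gt y hyr)]; exact hc)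

lemma goodAns_perm {s xs : List Int} (hp : s.Perm xs) {o : Option Int}
    (h : GoodAns s o) : GoodAns xs o := by
  cases o with
  | none => intro y hy; rw [← hp.count_eq]; exact h y (hp.mem_iff.mpr hy)
  | some m =>
      refine ⟨by rw [← hp.count_eq]; exact h.1, ?_⟩
      intro y hy hc
      exact h.2 y (hp.mem_iff.mpr hy) (by rw [hp.count_eq]; exact hc)

lemma good_scan (xs : List Int) :
    GoodAns xs (bsnScan (PySem.List.sorted xs (fun y => y) false) none) := by
  have hperm := PySem.List.sorted_perm xs (fun y => y) false
  have hpw := PySem.List.sorted_pairwise xs (fun y => y)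
  refine goodAns_perm hperm ?_
  rcases scan_spec (PySem.List.sorted xs (fun y => y) false).length _ le_rfl hpw none with
    ⟨h, heq⟩ | ⟨m, heq, hc, hmax⟩
  · rw [heq]; exact h
  · rw [heq]; exact ⟨hc, hmax⟩

-- ===== VERDICT (by name: the statement is the Claim_ definition above) =====
theorem biggest_single_number_spec : Claim_equal_biggest_single_number := by
  intro xs _
  unfold Spec_biggest_single_number biggest_single_number_alt
  rw [a_eq]
  exact congrArg (fun o => [("num", o)]) (goodAns_unique (good_singles xs) (good_scan xs))
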